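-- pv_equiv track=rewrite | github.com/xKuroiUsagix/python-online-marathon | split01/question05.py | toPostFixExpression
-- ===== SOURCE A (Python) =====
-- def toPostFixExpression(expression: list) -> list:
--     operators = ['-', '+', '*', '/', '%']
--     open_p, close_p = '(', ')'
--     output = []
--     output_operators = []
--
--     for number in expression:
--         if number not in operators:
--             output.append(number)
--         else:
--             output_operators.append(number)
--
--     return output + output_operators
-- ===== SOURCE B (Python) =====
-- def toPostFixExpression(expression: list) -> list:
--     operators = ['-', '+', '*', '/', '%']
--     return sorted(expression, key=lambda x: x in operators)
-- ===== Notes on version B (the rewrite author's own statement) =====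
-- stated objective: idiomatic
-- what changed: Replaces the two accumulator lists and explicit loop with a single stable sort keyed on the boolean operator test: operands (key False) keep their order first, operators (key True) follow in order.
import Mathlib
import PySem

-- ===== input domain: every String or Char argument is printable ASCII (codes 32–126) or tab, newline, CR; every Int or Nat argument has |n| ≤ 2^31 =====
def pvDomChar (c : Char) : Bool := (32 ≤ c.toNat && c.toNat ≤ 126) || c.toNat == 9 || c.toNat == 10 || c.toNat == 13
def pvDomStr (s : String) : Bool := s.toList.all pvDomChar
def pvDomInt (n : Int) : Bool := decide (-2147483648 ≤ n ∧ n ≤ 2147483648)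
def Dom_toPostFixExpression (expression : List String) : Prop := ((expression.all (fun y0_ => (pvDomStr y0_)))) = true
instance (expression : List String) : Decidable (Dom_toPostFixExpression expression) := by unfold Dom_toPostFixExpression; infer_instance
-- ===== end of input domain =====

-- B replaces A's two accumulator lists with one stable sort keyed on the operator test (idiomatic one-liner).


-- ===== PORT A =====
def toPostFixExpression (expression : List String) : List String :=
  let operators : List String := ["-", "+", "*", "/", "%"]
  let r := expression.foldl
    (fun (acc : List String × List String) number =>
      if number ∉ operators then (acc.1 ++ [number], acc.2)
      else (acc.1, acc.2 ++ [number]))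
    ([], [])
  r.1 ++ r.2

-- ===== PORT B =====
-- Python's bool sort key (x in operators) is ported as a Nat key 0/1 with the same order False < True.
def toPostFixExpression_alt (expression : List String) : List String :=
  let operators : List String := ["-", "+", "*", "/", "%"]
  PySem.List.sorted expression (fun x => if x ∈ operators then (1 : Nat) else 0) false

-- ===== PRECONDITION & SPEC =====
def Spec_toPostFixExpression (expression : List String) (out : List String) : Prop := out = toPostFixExpression_alt expression
instance (expression : List String) (out : List String) : Decidable (Spec_toPostFixExpression expression out) := by unfold Spec_toPostFixExpression; infer_instance

-- ===== CLAIM (what is proved, stated in full; the proofs are below) =====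
def Claim_equal_toPostFixExpression : Prop := ∀ (expression : List String), Dom_toPostFixExpression expression → Spec_toPostFixExpression expression (toPostFixExpression expression)

-- ===== LEMMAS AND PROOFS =====

-- abbreviations used only in the proofs
def pvOps : List String := ["-", "+", "*", "/", "%"]
def pvKey (x : String) : Nat := if x ∈ pvOps then 1 else 0
def pvBef (a b : String) : Bool := decide (pvKey a < pvKey b)

lemma insertBy_skip (x : String) (l0 rest : List String)
    (h0 : ∀ y ∈ l0, pvKey y = 0) :
    PySem.List.insertBy pvBef x (l0 ++ rest) = l0 ++ PySem.List.insertBy pvBef x rest := by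
  induction l0 with
  | nil => simp
  | cons y t ih =>
      have hy : pvKey y = 0 := h0 y (by simp)
      have hb : pvBef x y = false := by simp [pvBef, hy]
      simp only [List.cons_append, PySem.List.insertBy, hb, Bool.false_eq_true, if_false]
      rw [ih (fun z hz => h0 z (by simp [hz]))]

lemma insertBy_front (x : String) (l1 : List String)
    (hx : pvKey x = 0) (h1 : ∀ y ∈ l1, pvKey y = 1) :
    PySem.List.insertBy pvBef x l1 = x :: l1 := by
  cases l1 with
  | nil => simp [PySem.List.insertBy]
  | cons y t =>
      have hb : pvBef x y = true := by
        simp [pvBef, hx, h1 y (by simp)]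
      simp [PySem.List.insertBy, hb]

lemma foldl_insertBy_partition (xs : List String) :
    ∀ l0 l1 : List String, (∀ y ∈ l0, pvKey y = 0) → (∀ y ∈ l1, pvKey y = 1) →
    xs.foldl (fun acc x => PySem.List.insertBy pvBef x acc) (l0 ++ l1)
      = (l0 ++ xs.filter (fun x => decide (x ∉ pvOps))) ++ (l1 ++ xs.filter (fun x => decide (x ∈ pvOps))) := by
  induction xs with
  | nil => intro l0 l1 _ _; simp
  | cons x t ih =>
      intro l0 l1 h0 h1
      by_cases hx : x ∈ pvOps
      · have hk : pvKey x = 1 := by simp [pvKey, hx]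
        have hnb : ∀ y ∈ l0 ++ l1, pvBef x y = false := by
          intro y hy
          rcases List.mem_append.mp hy with h | h
          · simp [pvBef, hk, h0 y h]
          · simp [pvBef, hk, h1 y h]
        have hins : PySem.List.insertBy pvBef x (l0 ++ l1) = l0 ++ (l1 ++ [x]) := by
          rw [PySem.List.insertBy_of_forall_not_before _ _ _ hnb]; simp
        have h1' : ∀ y ∈ l1 ++ [x], pvKey y = 1 := by
          intro y hy
          rcases List.mem_append.mp hy with h | h
          · exact h1 y h
          · simp at h; simp [h, hk]
        simp only [List.foldl_cons, hins]
        rw [ih l0 (l1 ++ [x]) h0 h1']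
        simp [hx]
      · have hk : pvKey x = 0 := by simp [pvKey, hx]
        have hins : PySem.List.insertBy pvBef x (l0 ++ l1) = (l0 ++ [x]) ++ l1 := by
          rw [insertBy_skip x l0 l1 h0, insertBy_front x l1 hk h1]; simp
        have h0' : ∀ y ∈ l0 ++ [x], pvKey y = 0 := by
          intro y hy
          rcases List.mem_append.mp hy with h | h
          · exact h0 y h
          · simp at h; simp [h, hk]
        simp only [List.foldl_cons, hins]
        rw [ih (l0 ++ [x]) l1 h0' h1]
        simp [hx]

lemma alt_eq_filter (xs : List String) :
    toPostFixExpression_alt xs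
      = xs.filter (fun x => decide (x ∉ pvOps)) ++ xs.filter (fun x => decide (x ∈ pvOps)) := by
  show PySem.List.sorted xs (fun x => if x ∈ pvOps then (1 : Nat) else 0) false = _
  rw [PySem.List.sorted_eq_foldl_insertBy]
  have := foldl_insertBy_partition xs [] [] (by simp) (by simp)
  simpa [pvBef, pvKey] using this

lemma a_loop (xs : List String) :
    ∀ a b : List String,
    xs.foldl (fun (acc : List String × List String) number =>
      if number ∉ pvOps then (acc.1 ++ [number], acc.2)
      else (acc.1, acc.2 ++ [number])) (a, b)
      = (a ++ xs.filter (fun x => decide (x ∉ pvOps)), b ++ xs.filter (fun x => decide (x ∈ pvOps))) := by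
  induction xs with
  | nil => intro a b; simp
  | cons x t ih =>
      intro a b
      by_cases hx : x ∈ pvOps
      · simp only [List.foldl_cons, if_neg (show ¬ x ∉ pvOps from not_not_intro hx)]
        rw [ih a (b ++ [x])]
        simp [hx]
      · simp only [List.foldl_cons, if_pos hx]
        rw [ih (a ++ [x]) b]
        simp [hx]

lemma a_eq_filter (xs : List String) :
    toPostFixExpression xs
      = xs.filter (fun x => decide (x ∉ pvOps)) ++ xs.filter (fun x => decide (x ∈ pvOps)) := by
  show (xs.foldl (fun (acc : List String × List String) number =>
      if number ∉ pvOps then (acc.1 ++ [number], acc.2)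
      else (acc.1, acc.2 ++ [number])) ([], [])).1
    ++ (xs.foldl (fun (acc : List String × List String) number =>
      if number ∉ pvOps then (acc.1 ++ [number], acc.2)
      else (acc.1, acc.2 ++ [number])) ([], [])).2 = _
  rw [a_loop xs [] []]
  simp

-- ===== VERDICT (by name: the statement is the Claim_ definition above) =====
theorem toPostFixExpression_spec : Claim_equal_toPostFixExpression := by
  intro xs _
  show toPostFixExpression xs = toPostFixExpression_alt xs
  rw [alt_eq_filter, a_eq_filter]
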